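-- pv_equiv track=rewrite | github.com/HolgerKr/codejam-2014 | deceitful_war/deceitful_war.py | compute_game_points
-- ===== SOURCE A (Python) =====
-- def compute_game_points(woods_player1, woods_player2, points=0):
-- 	for w1 in woods_player1:
-- 		for w2 in woods_player2:
-- 			if w1 > w2:
-- 				points += 1
-- 				woods_player2 = woods_player2[woods_player2.index(w2)+1:]
-- 				break
-- 		if not woods_player2:
-- 			break
-- 	return points
-- ===== SOURCE B (Python) =====
-- def compute_game_points(woods_player1, woods_player2, points=0):
--     # Suffix minima + advancing cursor: smin[j] = min(woods_player2[j:]) lets us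
--     # reject a w1 with no beatable block in O(1); matched scans advance the cursor
--     # permanently, so the whole run is O(n + m) instead of A's O(n * m).
--     m = len(woods_player2)
--     smin = [0] * m
--     cur = None
--     for j in range(m - 1, -1, -1):
--         w = woods_player2[j]
--         cur = w if cur is None or w < cur else cur
--         smin[j] = cur
--     j = 0
--     pts = points
--     for w1 in woods_player1:
--         if j == m:
--             break
--         if smin[j] < w1:
--             while woods_player2[j] >= w1:
--                 j += 1
--             j += 1
--             pts += 1
--     return pts
-- ===== Notes on version B (the rewrite author's own statement) =====
-- stated objective: faster
-- what changed: Replaced the repeated rescans of the remaining player2 list (and the list.index + slicing per match) by a single advancing cursor with precomputed suffix minima: an unbeatable w1 is rejected in O(1) and each matched scan permanently consumes player2 elements.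
import Mathlib
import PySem

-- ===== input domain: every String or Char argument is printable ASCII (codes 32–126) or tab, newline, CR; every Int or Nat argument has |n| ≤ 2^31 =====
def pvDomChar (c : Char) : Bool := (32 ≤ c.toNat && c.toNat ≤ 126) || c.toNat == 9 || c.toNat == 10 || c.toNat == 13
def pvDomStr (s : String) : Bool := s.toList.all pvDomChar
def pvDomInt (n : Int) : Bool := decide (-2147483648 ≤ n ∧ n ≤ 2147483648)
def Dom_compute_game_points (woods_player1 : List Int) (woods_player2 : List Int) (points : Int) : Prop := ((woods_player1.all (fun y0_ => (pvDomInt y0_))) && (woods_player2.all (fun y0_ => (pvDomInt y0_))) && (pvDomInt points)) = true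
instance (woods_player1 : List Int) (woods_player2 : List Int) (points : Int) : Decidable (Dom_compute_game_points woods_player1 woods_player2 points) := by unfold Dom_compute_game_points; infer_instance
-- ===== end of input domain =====

-- B replaces A's repeated rescans of the remaining player2 list by a cursor with
-- precomputed suffix minima (amortized O(n+m) vs A's O(n*m)); return values proved equal.

-- ===== PORT A =====
-- inner 'for w2 in woods_player2: if w1 > w2: … break' — returns the w2 it broke on
def cgpFind (w1 : Int) : List Int → Option Int
  | [] => none
  | w2 :: t => if w1 > w2 then some w2 else cgpFind w1 t

-- outer 'for w1 in woods_player1' loop, state = (current woods_player2, points)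
def cgpA : List Int → List Int → Int → Int
  | [], _, pts => pts
  | w1 :: r, p2, pts =>
    match cgpFind w1 p2 with
    | some w2 =>
        -- woods_player2 = woods_player2[woods_player2.index(w2)+1:]
        let p2' := PySem.List.slice p2 (some (((PySem.List.index? p2 w2).getD 0 + 1 : Nat) : Int)) none
        if p2' = [] then pts + 1 else cgpA r p2' (pts + 1)
    | none => if p2 = [] then pts else cgpA r p2 pts

def compute_game_points (woods_player1 : List Int) (woods_player2 : List Int) (points : Int) : Int :=
  cgpA woods_player1 woods_player2 points

-- ===== PORT B =====
-- suffix minima of woods_player2, built back-to-front like Source B's reversed loop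
def cgpSmin : List Int → List Int
  | [] => []
  | w :: t =>
    match cgpSmin t with
    | [] => [w]
    | c :: t' => min w c :: c :: t'

-- 'while woods_player2[j] >= w1: j += 1'
def cgpScan (w1 : Int) (p2 : List Int) (j : Nat) : Nat :=
  if h : j < p2.length then
    if w1 ≤ p2[j] then cgpScan w1 p2 (j + 1) else j
  else j
termination_by p2.length - j

-- 'for w1 in woods_player1' with cursor j and points pts
def cgpB : List Int → List Int → List Int → Nat → Int → Int
  | [], _, _, _, pts => pts
  | w1 :: r, p2, smin, j, pts =>
    if j = p2.length then pts
    else if smin.getD j 0 < w1 then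
      cgpB r p2 smin (cgpScan w1 p2 j + 1) (pts + 1)
    else cgpB r p2 smin j pts

def compute_game_points_alt (woods_player1 : List Int) (woods_player2 : List Int) (points : Int) : Int :=
  cgpB woods_player1 woods_player2 (cgpSmin woods_player2) 0 points

-- ===== PRECONDITION & SPEC =====
def Spec_compute_game_points (woods_player1 : List Int) (woods_player2 : List Int) (points : Int) (out : Int) : Prop := out = compute_game_points_alt woods_player1 woods_player2 points
instance (woods_player1 : List Int) (woods_player2 : List Int) (points : Int) (out : Int) : Decidable (Spec_compute_game_points woods_player1 woods_player2 points out) := by unfold Spec_compute_game_points; infer_instance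

-- ===== CLAIM (what is proved, stated in full; the proofs are below) =====
def Claim_equal_compute_game_points : Prop := ∀ (woods_player1 : List Int) (woods_player2 : List Int) (points : Int), Dom_compute_game_points woods_player1 woods_player2 points → Spec_compute_game_points woods_player1 woods_player2 points (compute_game_points woods_player1 woods_player2 points)

-- ===== LEMMAS AND PROOFS =====

-- number of leading elements of the list that are ≥ w1
def cgpScanL (w1 : Int) : List Int → Nat
  | [] => 0
  | x :: t => if w1 ≤ x then cgpScanL w1 t + 1 else 0

theorem cgpSmin_cons (w : Int) (t : List Int) :
    ∃ a, cgpSmin (w :: t) = a :: cgpSmin t := by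
  cases h : cgpSmin t with
  | nil => exact ⟨w, by simp [cgpSmin, h]⟩
  | cons c t' => exact ⟨min w c, by simp [cgpSmin, h]⟩

theorem length_cgpSmin (l : List Int) : (cgpSmin l).length = l.length := by
  induction l with
  | nil => simp [cgpSmin]
  | cons w t ih =>
    obtain ⟨a, ha⟩ := cgpSmin_cons w t
    simp [ha, ih]

theorem cgpSmin_drop (l : List Int) (j : Nat) :
    cgpSmin (l.drop j) = (cgpSmin l).drop j := by
  induction l generalizing j with
  | nil => simp [cgpSmin]
  | cons w t ih =>
    cases j with
    | zero => simp
    | succ j =>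
      obtain ⟨a, ha⟩ := cgpSmin_cons w t
      simp [ha, ih]

theorem cgpSmin_head_lt_iff (rest : List Int) (w1 : Int) (h : rest ≠ []) :
    ((cgpSmin rest).headD 0 < w1 ↔ ∃ x ∈ rest, x < w1) := by
  induction rest with
  | nil => exact absurd rfl h
  | cons w t ih =>
    cases ht : cgpSmin t with
    | nil =>
      have : t = [] := by
        have := length_cgpSmin t
        simpa [ht] using this.symm
      subst this
      simp [cgpSmin]
    | cons c t' =>
      have htne : t ≠ [] := by
        intro he; rw [he] at ht; simp [cgpSmin] at ht
      have hhead : (cgpSmin (w :: t)).headD 0 = min w c := by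
        simp [cgpSmin, ht]
      have hct : (cgpSmin t).headD 0 = c := by simp [ht]
      rw [hhead]
      constructor
      · intro hlt
        rcases min_lt_iff.mp hlt with h1 | h1
        · exact ⟨w, by simp, h1⟩
        · obtain ⟨x, hx, hx1⟩ := (ih htne).mp (by rw [hct]; exact h1)
          exact ⟨x, by simp [hx], hx1⟩
      · rintro ⟨x, hx, hx1⟩
        rcases List.mem_cons.mp hx with rfl | hx
        · exact min_lt_iff.mpr (Or.inl hx1)
        · exact min_lt_iff.mpr (Or.inr (hct ▸ (ih htne).mpr ⟨x, hx, hx1⟩))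

theorem cgpFind_eq_none_iff (w1 : Int) (rest : List Int) :
    cgpFind w1 rest = none ↔ ∀ x ∈ rest, ¬ x < w1 := by
  induction rest with
  | nil => simp [cgpFind]
  | cons x t ih =>
    by_cases hx : x < w1
    · simp [cgpFind, hx]
    · simp [cgpFind, hx, ih]
      omega

theorem cgpFind_some_lt (w1 : Int) (rest : List Int) (w2 : Int)
    (h : cgpFind w1 rest = some w2) : w2 < w1 := by
  induction rest with
  | nil => simp [cgpFind] at h
  | cons x t ih =>
    by_cases hx : x < w1
    · simp [cgpFind, hx] at h; omega
    · simp [cgpFind, hx] at h; exact ih h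

theorem cgpFind_some_index (w1 : Int) (rest : List Int) (w2 : Int)
    (h : cgpFind w1 rest = some w2) :
    PySem.List.index? rest w2 = some (cgpScanL w1 rest) ∧ cgpScanL w1 rest < rest.length := by
  induction rest with
  | nil => simp [cgpFind] at h
  | cons x t ih =>
    by_cases hx : x < w1
    · simp [cgpFind, hx] at h
      subst h
      rw [PySem.List.index?_cons_self]
      simp [cgpScanL, not_le.mpr hx]
    · have hle : w1 ≤ x := not_lt.mp hx
      simp [cgpFind, hx] at h
      obtain ⟨h1, h2⟩ := ih h
      have hne : x ≠ w2 := by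
        have := cgpFind_some_lt w1 t w2 h
        omega
      rw [PySem.List.index?_cons_of_ne t hne, h1]
      simp [cgpScanL, hle, h2]

theorem cgpScan_eq (w1 : Int) (p2 : List Int) (j : Nat) (h : j ≤ p2.length) :
    cgpScan w1 p2 j = j + cgpScanL w1 (p2.drop j) := by
  fun_induction cgpScan w1 p2 j with
  | case1 j hj hle ih =>
    have hdrop : p2.drop j = p2[j] :: p2.drop (j + 1) := List.drop_eq_getElem_cons hj
    rw [hdrop]
    simp [cgpScanL, hle, ih hj]
    omega
  | case2 j hj hle =>
    have hdrop : p2.drop j = p2[j] :: p2.drop (j + 1) := List.drop_eq_getElem_cons hj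
    rw [hdrop]
    simp [cgpScanL, hle]
  | case3 j hj =>
    have : p2.drop j = [] := List.drop_of_length_le (by omega)
    simp [this, cgpScanL]

theorem cgpB_end (r p2 smin : List Int) (pts : Int) :
    cgpB r p2 smin p2.length pts = pts := by
  induction r with
  | nil => simp [cgpB]
  | cons w1 t ih => simp [cgpB]

theorem cgp_main (p1 p2 : List Int) (j : Nat) (pts : Int) (h : j ≤ p2.length) :
    cgpA p1 (p2.drop j) pts = cgpB p1 p2 (cgpSmin p2) j pts := by
  induction p1 generalizing j pts with
  | nil => simp [cgpA, cgpB]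
  | cons w1 r ih =>
    rcases eq_or_lt_of_le h with heq | hlt
    · have hdrop : p2.drop j = [] := List.drop_of_length_le (le_of_eq heq.symm)
      simp [cgpA, cgpB, cgpFind, heq]
    · have hne : p2.drop j ≠ [] := by
        intro he
        have := congrArg List.length he
        simp at this
        omega
      have hguard : j ≠ p2.length := Nat.ne_of_lt hlt
      have hgetD : (cgpSmin p2).getD j 0 = (cgpSmin (p2.drop j)).headD 0 := by
        rw [cgpSmin_drop]
        rw [List.getD_eq_getElem?_getD, List.headD_eq_head?_getD, List.head?_drop]
      by_cases hc : ∃ x ∈ p2.drop j, x < w1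
      · -- a beatable block exists in the remaining suffix
        have hcond : (cgpSmin p2).getD j 0 < w1 := by
          rw [hgetD]; exact (cgpSmin_head_lt_iff _ w1 hne).mpr hc
        obtain ⟨w2, hfind⟩ : ∃ w2, cgpFind w1 (p2.drop j) = some w2 := by
          cases hf : cgpFind w1 (p2.drop j) with
          | none =>
            obtain ⟨x, hx, hx1⟩ := hc
            exact absurd hx1 ((cgpFind_eq_none_iff w1 _).mp hf x hx)
          | some w2 => exact ⟨w2, rfl⟩
        obtain ⟨hidx, hslt⟩ := cgpFind_some_index w1 _ w2 hfind
        set s := cgpScanL w1 (p2.drop j) with hs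
        have hlen : (p2.drop j).length = p2.length - j := List.length_drop ..
        have hslice : PySem.List.slice (p2.drop j)
            (some (((PySem.List.index? (p2.drop j) w2).getD 0 + 1 : Nat) : Int)) none
            = p2.drop (j + s + 1) := by
          rw [hidx]
          rw [PySem.List.slice_from_natCast]
          rw [List.drop_drop]
          congr 1
        have hscan : cgpScan w1 p2 j = j + s := cgpScan_eq w1 p2 j h
        have hA : cgpA (w1 :: r) (p2.drop j) pts =
            (if p2.drop (j + s + 1) = [] then pts + 1
             else cgpA r (p2.drop (j + s + 1)) (pts + 1)) := by
          simp only [cgpA, hfind, hslice]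
        have hB : cgpB (w1 :: r) p2 (cgpSmin p2) j pts =
            cgpB r p2 (cgpSmin p2) (j + s + 1) (pts + 1) := by
          simp only [cgpB]
          rw [if_neg hguard, if_pos hcond, hscan]
        rw [hA, hB]
        by_cases hemp : p2.drop (j + s + 1) = []
        · have hlen2 : j + s + 1 = p2.length := by
            have := congrArg List.length hemp
            simp at this
            omega
          simp [hlen2, cgpB_end]
        · have hle2 : j + s + 1 ≤ p2.length := by omega
          simp [hemp, ih (j + s + 1) (pts + 1) hle2]
      · -- no beatable block: both sides keep state unchanged
        have hcond : ¬ (cgpSmin p2).getD j 0 < w1 := by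
          rw [hgetD]
          intro hlt2
          exact hc ((cgpSmin_head_lt_iff _ w1 hne).mp hlt2)
        have hfind : cgpFind w1 (p2.drop j) = none := by
          rw [cgpFind_eq_none_iff]
          intro x hx hx1
          exact hc ⟨x, hx, hx1⟩
        simp only [cgpA, cgpB, hfind, hguard, hcond, if_false]
        simp [hne, ih j pts h]

-- ===== VERDICT (by name: the statement is the Claim_ definition above) =====
theorem compute_game_points_spec : Claim_equal_compute_game_points := by
  intro p1 p2 pts _
  unfold Spec_compute_game_points compute_game_points compute_game_points_alt
  simpa using cgp_main p1 p2 0 pts (Nat.zero_le _)
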